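-- pv_equiv track=rewrite | github.com/ayoubc/competitive-programming | online_judges/codechef/ANDSUBAR.py | solve
-- ===== SOURCE A (Python) =====
-- def solve(n):
--     k = 0
--     ans = 0
--     while True:
--         a = (1 << k)
--         if a > n:
--             break
--
--         ans = max(ans, min(n, 2 * a - 1) - a + 1)
--         k += 1
--
--     return ans
-- ===== SOURCE B (Python) =====
-- def solve(n):
--     if n < 1:
--         return 0
--     m = n.bit_length() - 1
--     if m == 0:
--         return 1
--     return max(n - (1 << m) + 1, 1 << (m - 1))
-- ===== Notes on version B (the rewrite author's own statement) =====
-- stated objective: simpler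
-- what changed: Replaces the while-loop scan over all powers of two up to n with a constant-time closed form: from the bit length of n it takes the larger of the top partial block and the last full block below it.
import Mathlib
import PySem

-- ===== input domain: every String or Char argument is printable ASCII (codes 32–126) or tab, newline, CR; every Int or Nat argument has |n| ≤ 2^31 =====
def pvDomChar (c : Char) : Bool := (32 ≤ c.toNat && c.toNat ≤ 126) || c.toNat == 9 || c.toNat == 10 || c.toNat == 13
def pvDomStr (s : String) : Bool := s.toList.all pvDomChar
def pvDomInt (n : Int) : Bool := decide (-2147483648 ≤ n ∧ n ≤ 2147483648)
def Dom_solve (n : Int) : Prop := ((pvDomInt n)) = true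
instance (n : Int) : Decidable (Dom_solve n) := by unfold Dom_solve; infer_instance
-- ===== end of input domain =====

-- ===== PORT A =====
-- while-loop over k: a = 2^k; stop when a > n; ans accumulates block sizes.
-- fuel is a totality guard only: 40 exceeds the loop's iteration count on all of Dom (|n| ≤ 2^31).
def solveLoop : Int → Nat → Nat → Int → Int
  | _, 0, _, ans => ans
  | n, fuel + 1, k, ans =>
    let a : Int := 2 ^ k
    if a > n then ans
    else solveLoop n fuel (k + 1) (max ans (min n (2 * a - 1) - a + 1))

def solve (n : Int) : Int := solveLoop n 40 0 0

-- ===== PORT B =====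
-- closed form: m = bit_length(n) - 1 (exponent of the largest power of two ≤ n)
def solve_alt (n : Int) : Int :=
  if n < 1 then 0
  else
    let m := Nat.log2 n.toNat
    if m = 0 then 1
    else max (n - 2 ^ m + 1) (2 ^ (m - 1))

-- ===== PRECONDITION & SPEC =====
def Spec_solve (n : Int) (out : Int) : Prop := out = solve_alt n
instance (n : Int) (out : Int) : Decidable (Spec_solve n out) := by unfold Spec_solve; infer_instance

-- ===== CLAIM (what is proved, stated in full; the proofs are below) =====
def Claim_equal_solve : Prop := ∀ (n : Int), Dom_solve n → Spec_solve n (solve n)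

-- ===== LEMMAS AND PROOFS =====

-- ===== VERDICT (by name: the statement is the Claim_ definition above) =====
-- Loop characterisation: once 2^k ≤ n < 2^(m+1) with 2^m ≤ n and enough fuel, the loop's
-- remaining contribution is n - 2^m + 1 (top block) joined with 2^(m-1) when k < m.
theorem solveLoop_eq (m : Nat) (n : Int) (hlo : (2:Int) ^ m ≤ n) (hhi : n < 2 ^ (m + 1)) :
    ∀ fuel k ans, k ≤ m → m - k + 2 ≤ fuel →
    solveLoop n fuel k ans =
      max ans (if k = m then n - 2 ^ m + 1 else max ((2:Int) ^ (m - 1)) (n - 2 ^ m + 1)) := by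
  intro fuel
  induction fuel with
  | zero => intro k ans _ hf; omega
  | succ fuel ih =>
    intro k ans hk hf
    by_cases hkm : k = m
    · subst hkm
      rw [solveLoop]
      have h1 : ¬ ((2:Int) ^ k > n) := by omega
      rw [if_neg h1]
      obtain ⟨f, rfl⟩ : ∃ f, fuel = f + 1 := ⟨fuel - 1, by omega⟩
      rw [solveLoop]
      have h2 : (2:Int) ^ (k + 1) > n := by
        have : (2:Int) ^ (k+1) = 2 * 2 ^ k := by ring
        omega
      rw [if_pos h2]
      have hmin : min n (2 * (2:Int) ^ k - 1) = n := by
        have : (2:Int) ^ (k+1) = 2 * 2 ^ k := by ring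
        omega
      simp [hmin]
    · have hklt : k < m := by omega
      rw [solveLoop]
      have hkm2 : (2:Int) ^ k ≤ 2 ^ m := pow_le_pow_right₀ (by omega) (by omega)
      have hkn : (2:Int) ^ k ≤ n := le_trans hkm2 hlo
      have hng : ¬ ((2:Int) ^ k > n) := not_lt.mpr hkn
      rw [if_neg hng]
      rw [ih (k+1) _ (by omega) (by omega)]
      have hfull : (2:Int) ^ (k+1) ≤ 2 ^ m := pow_le_pow_right₀ (by omega) (by omega)
      have h2k1 : (2:Int) ^ (k+1) = 2 * 2 ^ k := by ring
      have hmin : min n (2 * (2:Int) ^ k - 1) = 2 * 2 ^ k - 1 := by omega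
      rw [hmin]
      have harith : 2 * (2:Int) ^ k - 1 - 2 ^ k + 1 = 2 ^ k := by ring
      rw [harith]
      rw [if_neg hkm]
      by_cases hke : k + 1 = m
      · rw [if_pos hke]
        have hpow : (2:Int) ^ k = 2 ^ (m - 1) := by rw [show m - 1 = k from by omega]
        rw [max_assoc, hpow]
      · rw [if_neg hke]
        have hle : (2:Int) ^ k ≤ 2 ^ (m-1) := pow_le_pow_right₀ (by omega) (by omega)
        rw [max_assoc]
        congr 1
        exact max_eq_right (le_trans hle (le_max_left _ _))

theorem solve_spec : Claim_equal_solve := by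
  unfold Claim_equal_solve Spec_solve
  intro n hdom
  have hbnd : n ≤ 2147483648 := by
    have := of_decide_eq_true hdom
    simp at this
    omega
  by_cases hn : n < 1
  · show solveLoop n (39 + 1) 0 0 = _
    rw [solveLoop]
    have h : ((2:Int) ^ (0:Nat)) > n := by norm_num; omega
    rw [if_pos h, solve_alt, if_pos hn]
  · have hn' : (1:Int) ≤ n := not_lt.mp hn
    have hnt : n.toNat ≠ 0 := by omega
    have htn : (n.toNat : Int) = n := Int.toNat_of_nonneg (by omega)
    have hlo : (2:Int) ^ Nat.log2 n.toNat ≤ n := by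
      have h2 : ((2:Nat) ^ Nat.log2 n.toNat : Int) ≤ (n.toNat : Int) := by
        exact_mod_cast Nat.log2_self_le hnt
      rw [htn] at h2; push_cast at h2; exact h2
    have hhi : n < (2:Int) ^ (Nat.log2 n.toNat + 1) := by
      have h2 : (n.toNat : Int) < ((2:Nat) ^ (Nat.log2 n.toNat + 1) : Int) := by
        exact_mod_cast Nat.lt_log2_self (n := n.toNat)
      rw [htn] at h2; push_cast at h2; exact h2
    have hmle : Nat.log2 n.toNat ≤ 31 := by
      by_contra hgt
      have h32 : (2:Nat) ^ 32 ≤ 2 ^ Nat.log2 n.toNat := Nat.pow_le_pow_right (by omega) (by omega)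
      have := Nat.log2_self_le hnt
      have hb : n.toNat ≤ 2147483648 := by omega
      norm_num at h32
      omega
    rw [solve, solveLoop_eq (Nat.log2 n.toNat) n hlo hhi 40 0 0 (Nat.zero_le _) (by omega)]
    show _ = if n < 1 then (0:Int) else if Nat.log2 n.toNat = 0 then 1
      else max (n - 2 ^ Nat.log2 n.toNat + 1) (2 ^ (Nat.log2 n.toNat - 1))
    rw [if_neg hn]
    by_cases hm0 : Nat.log2 n.toNat = 0
    · rw [if_pos hm0, if_pos hm0.symm]
      rw [hm0] at hlo hhi
      have h1 : (1:Int) ≤ n := by simpa using hlo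
      have h2 : n < 2 := by simpa using hhi
      have hn1 : n = 1 := by omega
      subst hn1
      simp only [hm0]
      norm_num
    · have hne : ¬ ((0:Nat) = Nat.log2 n.toNat) := fun h => hm0 h.symm
      rw [if_neg hm0, if_neg hne]
      have h1 : (1:Int) ≤ 2 ^ (Nat.log2 n.toNat - 1) := one_le_pow₀ (by omega)
      rw [max_comm (n - 2 ^ Nat.log2 n.toNat + 1)]
      exact max_eq_right (le_trans (le_trans (by omega) h1) (le_max_left _ _))
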